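-- pv_equiv track=rewrite | github.com/sparta-miracle/algorithm_study | seungyoon/23_01_26_01.py | solution
-- ===== SOURCE A (Python) =====
-- def solution(k, m, score):
--     score.sort(reverse=True)
--     A = 0
--     B = [] * m
--     for i in score:
--         B.append(i)
--         if len(B) == m:
--             A += min(B) * len(B)
--             B = [] * m
--     return A
-- ===== SOURCE B (Python) =====
-- def solution(k, m, score):
--     score.sort(reverse=True)
--     if m <= 0:
--         return 0
--     total = 0
--     i = m - 1
--     while i < len(score):
--         total += score[i]
--         i += m
--     return m * total
-- ===== Notes on version B (the rewrite author's own statement) =====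
-- stated objective: simpler
-- what changed: Replaces A's bucket accumulation (append to a temporary list, flush with min() every m elements) by a direct stride walk over the descending-sorted list: the minimum of each full m-group is the element at index m-1, 2m-1, ..., so B sums those and multiplies by m once; no temporary lists or min() scans.
import Mathlib
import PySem

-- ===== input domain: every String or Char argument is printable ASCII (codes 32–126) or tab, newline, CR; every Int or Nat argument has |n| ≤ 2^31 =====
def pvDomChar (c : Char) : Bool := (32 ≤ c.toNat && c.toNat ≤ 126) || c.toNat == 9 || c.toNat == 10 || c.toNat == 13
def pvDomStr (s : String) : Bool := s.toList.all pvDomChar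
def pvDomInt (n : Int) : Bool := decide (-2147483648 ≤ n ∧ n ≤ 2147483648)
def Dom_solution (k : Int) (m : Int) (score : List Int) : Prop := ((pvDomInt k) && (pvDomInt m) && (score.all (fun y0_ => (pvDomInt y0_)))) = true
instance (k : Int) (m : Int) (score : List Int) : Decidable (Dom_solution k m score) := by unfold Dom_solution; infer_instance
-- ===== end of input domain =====

-- B replaces A's bucket-and-min grouping by a stride walk (group minima sit at indices
-- m-1, 2m-1, ... of the descending-sorted list); simpler, same return value.
-- Both A and B sort `score` in place; the equivalence proved here is about the return value.

-- ===== PORT A =====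
-- one loop step of A: append i to the bucket B, flush when it reaches length m
def solStep (m : Int) (st : Int × List Int) (i : Int) : Int × List Int :=
  let B := st.2 ++ [i]
  if (B.length : Int) = m then
    (st.1 + ((PySem.List.min? B (fun y => y)).getD 0) * (B.length : Int), ([] : List Int))
  else
    (st.1, B)

def solution (k : Int) (m : Int) (score : List Int) : Int :=
  let s := PySem.List.sorted score (fun y => y) true
  (s.foldl (solStep m) (0, ([] : List Int))).1

-- ===== PORT B =====
-- B's while loop: i starts at m-1, steps by m, adds score[i]
def strideLoop (l : List Int) (m : Int) (hm : 0 < m) (i : Int) (total : Int) : Int :=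
  if h : i < (l.length : Int) then
    strideLoop l m hm (i + m) (total + PySem.List.pyGetD l i 0)
  else total
termination_by ((l.length : Int) - i).toNat
decreasing_by omega

def solution_alt (k : Int) (m : Int) (score : List Int) : Int :=
  let s := PySem.List.sorted score (fun y => y) true
  if hm : m ≤ 0 then 0
  else m * strideLoop s m (by omega) (m - 1) 0

-- ===== PRECONDITION & SPEC =====
def Spec_solution (k : Int) (m : Int) (score : List Int) (out : Int) : Prop := out = solution_alt k m score
instance (k : Int) (m : Int) (score : List Int) (out : Int) : Decidable (Spec_solution k m score out) := by unfold Spec_solution; infer_instance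

-- ===== CLAIM (what is proved, stated in full; the proofs are below) =====
def Claim_equal_solution : Prop := ∀ (k : Int) (m : Int) (score : List Int), Dom_solution k m score → Spec_solution k m score (solution k m score)

-- ===== LEMMAS AND PROOFS =====

-- with m ≤ 0 the bucket (length ≥ 1 after an append) never reaches m: A's accumulator stays put
theorem foldl_solStep_nonpos (m : Int) (hm : m ≤ 0) (c : List Int) :
    ∀ (A : Int) (B : List Int), (c.foldl (solStep m) (A, B)).1 = A := by
  induction c with
  | nil => intro A B; rfl
  | cons x t ih =>
      intro A B
      have hne : ¬ ((((B ++ [x]).length : Nat) : Int) = m) := by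
        simp only [List.length_append, List.length_cons, List.length_nil]
        push_cast; omega
      simp only [List.foldl_cons, solStep, if_neg hne]
      exact ih A (B ++ [x])

-- if the bucket can never fill, the fold just appends
theorem foldl_solStep_short (m : Int) :
    ∀ (c : List Int) (A : Int) (B : List Int), ((B.length : Int) + c.length < m) →
      c.foldl (solStep m) (A, B) = (A, B ++ c) := by
  intro c
  induction c with
  | nil => intro A B _; simp
  | cons x t ih =>
      intro A B h
      simp only [List.length_cons] at h
      have hne : ¬ ((((B ++ [x]).length : Nat) : Int) = m) := by
        simp only [List.length_append, List.length_cons, List.length_nil]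
        push_cast at h ⊢; omega
      simp only [List.foldl_cons, solStep, if_neg hne]
      have := ih A (B ++ [x])
        (by simp only [List.length_append, List.length_cons, List.length_nil]; push_cast at h ⊢; omega)
      simpa using this

-- a chunk that exactly fills the bucket flushes once, with the min of bucket ++ chunk
theorem foldl_solStep_fill (m : Int) :
    ∀ (c : List Int), c ≠ [] → ∀ (A : Int) (B : List Int), ((B.length : Int) + c.length = m) →
      c.foldl (solStep m) (A, B) =
        (A + ((PySem.List.min? (B ++ c) (fun y => y)).getD 0) * m, ([] : List Int)) := by
  intro c
  induction c with
  | nil => intro h; exact absurd rfl h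
  | cons x t ih =>
      intro _ A B h
      simp only [List.length_cons] at h
      by_cases ht : t = []
      · subst ht
        have hB : (((B ++ [x]).length : Nat) : Int) = m := by
          simp only [List.length_append, List.length_cons, List.length_nil] at h ⊢
          push_cast at h ⊢; omega
        simp only [List.foldl_cons, solStep, if_pos hB, List.foldl_nil]
        rw [hB]
      · have htl : 0 < t.length := List.length_pos_iff.mpr ht
        have hne : ¬ ((((B ++ [x]).length : Nat) : Int) = m) := by
          simp only [List.length_append, List.length_cons, List.length_nil]
          push_cast at h ⊢; omega
        simp only [List.foldl_cons, solStep, if_neg hne]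
        have := ih ht A (B ++ [x])
          (by simp only [List.length_append, List.length_cons, List.length_nil]
              push_cast at h ⊢; omega)
        simpa [List.append_assoc] using this

-- in a descending list every element dominates the last one
theorem getLast_le_of_desc (l : List Int) (hs : l.Pairwise (fun a b => b ≤ a)) :
    ∀ (hne : l ≠ []), ∀ x ∈ l, l.getLast hne ≤ x := by
  induction l with
  | nil => intro hne; exact absurd rfl hne
  | cons a t ih =>
      intro _ x hx
      rcases List.pairwise_cons.mp hs with ⟨ha, ht⟩
      rcases List.mem_cons.mp hx with h | h
      · subst h
        by_cases htne : t = []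
        · subst htne; simp
        · rw [List.getLast_cons htne]
          exact ha _ (List.getLast_mem htne)
      · have htne : t ≠ [] := List.ne_nil_of_mem h
        rw [List.getLast_cons htne]
        exact ih ht htne x h

-- value of min over a descending list: it is the last element
theorem min_of_desc (l : List Int) (hne : l ≠ [])
    (hs : l.Pairwise (fun a b => b ≤ a)) :
    (PySem.List.min? l (fun y => y)).getD 0 = l.getLast hne := by
  obtain ⟨v, hv⟩ : ∃ v, PySem.List.min? l (fun y => y) = some v := by
    cases h : PySem.List.min? l (fun y => y) with
    | none => exact absurd ((PySem.List.min?_eq_none_iff l (fun y => y)).mp h) hne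
    | some v => exact ⟨v, rfl⟩
  rw [hv]
  have h1 : v ≤ l.getLast hne := PySem.List.min?_isMin hv _ (List.getLast_mem hne)
  have h2 : l.getLast hne ≤ v := getLast_le_of_desc l hs hne v (PySem.List.min?_mem hv)
  simp only [Option.getD_some]
  omega

-- shifting the stride start by m moves to the dropped list
theorem strideLoop_shift (l : List Int) (m : Int) (hm : 0 < m)
    (i total : Int) (hi : 0 ≤ i) (hlen : (m.toNat : Int) ≤ (l.length : Int)) :
    strideLoop l m hm (i + m) total = strideLoop (l.drop m.toNat) m hm i total := by
  have hlen' : ((l.drop m.toNat).length : Int) = (l.length : Int) - (m.toNat : Int) := by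
    simp only [List.length_drop]; omega
  conv_rhs => rw [strideLoop]
  rw [strideLoop]
  by_cases hin : i < ((l.drop m.toNat).length : Int)
  · have hin2 : i + m < (l.length : Int) := by omega
    rw [dif_pos hin2, dif_pos hin]
    have hget : PySem.List.pyGetD l (i + m) 0 = PySem.List.pyGetD (l.drop m.toNat) i 0 := by
      rw [PySem.List.pyGetD_of_nonneg _ _ (by omega : (0:Int) ≤ i + m),
          PySem.List.pyGetD_of_nonneg _ _ hi]
      simp only [List.getD_eq_getElem?_getD]
      have hdg : (l.drop m.toNat)[(i.toNat)]? = l[m.toNat + i.toNat]? := List.getElem?_drop ..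
      rw [hdg]
      congr 2
      omega
    rw [hget]
    exact strideLoop_shift l m hm (i + m) (total + PySem.List.pyGetD (l.drop m.toNat) i 0) (by omega) hlen
  · have hout2 : ¬ (i + m < (l.length : Int)) := by omega
    rw [dif_neg hout2, dif_neg hin]
termination_by ((l.length : Int) - i).toNat
decreasing_by omega

-- the stride accumulator is linear
theorem strideLoop_add (l : List Int) (m : Int) (hm : 0 < m) (i total : Int) :
    strideLoop l m hm i total = total + strideLoop l m hm i 0 := by
  conv_rhs => rw [strideLoop]
  rw [strideLoop]
  by_cases h : i < (l.length : Int)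
  · rw [dif_pos h, dif_pos h]
    rw [strideLoop_add l m hm (i + m) (total + PySem.List.pyGetD l i 0),
        strideLoop_add l m hm (i + m) (0 + PySem.List.pyGetD l i 0)]
    omega
  · rw [dif_neg h, dif_neg h]; omega
termination_by ((l.length : Int) - i).toNat
decreasing_by all_goals omega

-- main invariant: on a descending list, the fold from an empty bucket adds m * stride sum
theorem fold_eq_stride (m : Int) (hm : 0 < m) :
    ∀ (s : List Int), s.Pairwise (fun a b => b ≤ a) → ∀ (A : Int),
      (s.foldl (solStep m) (A, ([] : List Int))).1 = A + m * strideLoop s m hm (m - 1) 0 := by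
  intro s
  induction hn : s.length using Nat.strong_induction_on generalizing s with
  | _ n ih =>
  intro hs A
  by_cases hlt : (s.length : Int) < m
  · rw [foldl_solStep_short m s A [] (by simpa using hlt)]
    rw [strideLoop, dif_neg (by omega)]
    ring
  · have hmn : m.toNat ≤ s.length := by omega
    have hsplit : s = s.take m.toNat ++ s.drop m.toNat := (List.take_append_drop _ s).symm
    have htne : s.take m.toNat ≠ [] := by
      have : (s.take m.toNat).length = m.toNat := by simp [List.length_take]; omega
      intro hc; rw [hc] at this; simp at this; omega
    have htlen : ((s.take m.toNat).length : Int) = m := by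
      simp [List.length_take]; omega
    conv_lhs => rw [hsplit]
    rw [List.foldl_append]
    rw [foldl_solStep_fill m (s.take m.toNat) htne A [] (by simpa using htlen)]
    have hps : (s.drop m.toNat).Pairwise (fun a b => b ≤ a) := List.Pairwise.drop hs
    have hdn : (s.drop m.toNat).length < n := by
      simp [List.length_drop]; omega
    rw [ih _ hdn _ rfl hps]
    -- identify the flushed min with s[m-1]
    have hmin : (PySem.List.min? ([] ++ s.take m.toNat) (fun y => y)).getD 0
        = PySem.List.pyGetD s (m - 1) 0 := by
      rw [List.nil_append, min_of_desc _ htne (hs.sublist (List.take_sublist _ _))]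
      rw [PySem.List.pyGetD_of_nonneg _ _ (by omega : (0:Int) ≤ m - 1)]
      rw [List.getLast_eq_getElem]
      rw [List.getElem_take]
      have hlt2 : m.toNat - 1 < s.length := by omega
      have : s[(s.take m.toNat).length - 1] = s[m.toNat - 1]'hlt2 := by
        congr 1
        omega
      rw [this]
      have hidx : (m - 1).toNat = m.toNat - 1 := by omega
      simp [List.getD_eq_getElem?_getD, hidx, List.getElem?_eq_getElem hlt2]
    -- unfold one stride step on s
    have hstep : strideLoop s m hm (m - 1) 0
        = PySem.List.pyGetD s (m - 1) 0 + strideLoop (s.drop m.toNat) m hm (m - 1) 0 := by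
      rw [strideLoop, dif_pos (show m - 1 < (s.length : Int) by omega)]
      rw [strideLoop_shift s m hm (m - 1) _ (by omega) (by omega)]
      rw [strideLoop_add]
      omega
    rw [hstep, hmin]
    ring

-- ===== VERDICT (by name: the statement is the Claim_ definition above) =====
theorem solution_spec : Claim_equal_solution := by
  unfold Claim_equal_solution Spec_solution
  intro k m score _
  unfold solution solution_alt
  by_cases hm : m ≤ 0
  · simp only [dif_pos hm]
    exact foldl_solStep_nonpos m hm _ 0 []
  · simp only [dif_neg hm]
    have h := fold_eq_stride m (by omega) (PySem.List.sorted score (fun y => y) true)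
      (PySem.List.sorted_pairwise_rev score (fun y => y)) 0
    simpa using h
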